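-- pv_equiv track=rewrite | github.com/cokemania2/workspace | codingTest/백준/폴리오미노.py | polyomino
-- ===== SOURCE A (Python) =====
-- def X_to_AB(count):
--     answer = ""
--     answer += "AAAA" * (count // 4)
--     answer += "BB" if count % 4 == 2 else ""
--     return answer
--
-- def polyomino(s):
--
--     answer = ""
--     count = 0
--     for i in s:
--         if i == 'X':
--             count += 1
--         else:
--             if count % 2 != 0:
--                 return "-1"
--             answer += X_to_AB(count)
--             answer += "."
--             count = 0
--     if count % 2 != 0:
--         return "-1"
--     answer += X_to_AB(count)
--     return answer
-- ===== SOURCE B (Python) =====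
-- def X_to_AB(count):
--     answer = ""
--     answer += "AAAA" * (count // 4)
--     answer += "BB" if count % 4 == 2 else ""
--     return answer
--
-- def polyomino(s):
--     # Phase 1: compute the list of X-run lengths (one entry per maximal run,
--     # empty runs included between/around separators).
--     runs = [0]
--     for c in s:
--         if c == 'X':
--             runs[-1] += 1
--         else:
--             runs.append(0)
--     # Phase 2: validate all runs at once.
--     if any(r % 2 != 0 for r in runs):
--         return "-1"
--     # Phase 3: map each run to its tiling and join with '.' per separator.
--     return ".".join(X_to_AB(r) for r in runs)
-- ===== Notes on version B (the rewrite author's own statement) =====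
-- stated objective: alternative
-- what changed: A interleaves validation and string building in one scan with an early return; B first computes the list of X-run lengths, then validates all runs in a separate any() pass, then maps each run to its tiling and joins with one dot per separator.
import Mathlib
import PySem

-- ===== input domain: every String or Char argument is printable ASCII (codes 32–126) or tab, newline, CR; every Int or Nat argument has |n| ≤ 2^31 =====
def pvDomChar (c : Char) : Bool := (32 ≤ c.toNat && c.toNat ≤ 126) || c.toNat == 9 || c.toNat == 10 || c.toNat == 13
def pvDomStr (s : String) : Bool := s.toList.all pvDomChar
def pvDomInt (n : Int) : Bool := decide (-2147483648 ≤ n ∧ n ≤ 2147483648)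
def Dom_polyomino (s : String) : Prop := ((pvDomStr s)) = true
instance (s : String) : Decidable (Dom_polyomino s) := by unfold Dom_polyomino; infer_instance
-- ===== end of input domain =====

-- B restructures A's single count-and-append scan into three phases: run lengths, a separate validation pass, map+join.

-- ===== PORT A =====
-- shared helper X_to_AB (used verbatim by both Pythons)
def XtoAB (count : Int) : List Char :=
  let answer : List Char := []
  let answer := answer ++ PySem.List.pyRepeat "AAAA".toList (PySem.Int.floordiv count 4)
  let answer := answer ++ (if PySem.Int.mod count 4 = 2 then "BB".toList else [])
  answer

-- A's for-loop with its early return, as structural recursion over (answer, count)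
def polyLoopA : List Char → List Char → Int → List Char
  | [], answer, count =>
      if (PySem.Int.mod count 2 != 0) then "-1".toList else answer ++ XtoAB count
  | c :: rest, answer, count =>
      if c = 'X' then polyLoopA rest answer (count + 1)
      else if (PySem.Int.mod count 2 != 0) then "-1".toList
      else polyLoopA rest (answer ++ XtoAB count ++ ['.']) 0

def polyomino (s : String) : String := String.mk (polyLoopA s.toList [] 0)

-- ===== PORT B =====
-- Source B phase 1 loop body: runs[-1] += 1 / runs.append(0)
def runsStep (runs : List Int) (c : Char) : List Int :=
  if c = 'X' then runs.dropLast ++ [(runs.getLast?.getD 0) + 1] else runs ++ [(0 : Int)]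

def polyomino_alt (s : String) : String :=
  let runs := s.toList.foldl runsStep [(0 : Int)]
  if runs.any (fun r => PySem.Int.mod r 2 != 0) then "-1"
  else String.mk (PySem.Chars.join ['.'] (runs.map XtoAB))

-- ===== PRECONDITION & SPEC =====
def Spec_polyomino (s : String) (out : String) : Prop := out = polyomino_alt s
instance (s : String) (out : String) : Decidable (Spec_polyomino s out) := by unfold Spec_polyomino; infer_instance

-- ===== CLAIM (what is proved, stated in full; the proofs are below) =====
def Claim_equal_polyomino : Prop := ∀ (s : String), Dom_polyomino s → Spec_polyomino s (polyomino s)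


-- ===== LEMMAS AND PROOFS =====

-- spec-layer segmentation: (first run length, remaining run lengths), built from the right
def segsR : List Char → Int × List Int
  | [] => (0, [])
  | c :: rest =>
      let p := segsR rest
      if c = 'X' then (p.1 + 1, p.2) else (0, p.1 :: p.2)

theorem segsR_X (rest : List Char) :
    segsR ('X' :: rest) = ((segsR rest).1 + 1, (segsR rest).2) := by simp [segsR]

theorem segsR_sep (c : Char) (rest : List Char) (hc : ¬ c = 'X') :
    segsR (c :: rest) = (0, (segsR rest).1 :: (segsR rest).2) := by simp [segsR, hc]

theorem foldl_runsStep_eq (l : List Char) :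
    ∀ (rs : List Int) (a : Int),
      l.foldl runsStep (rs ++ [a]) = rs ++ (a + (segsR l).1) :: (segsR l).2 := by
  induction l with
  | nil => intro rs a; simp [segsR]
  | cons c rest ih =>
      intro rs a
      by_cases hc : c = 'X'
      · subst hc
        rw [List.foldl_cons, runsStep, if_pos rfl, List.dropLast_concat,
          List.getLast?_concat, Option.getD_some, ih rs (a + 1), segsR_X]
        have h2 : a + 1 + (segsR rest).1 = a + ((segsR rest).1 + 1) := by ring
        rw [h2]
      · rw [List.foldl_cons, runsStep, if_neg hc, List.append_assoc]
        have h3 := ih (rs ++ [a]) 0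
        rw [List.append_assoc] at h3
        rw [h3, segsR_sep c rest hc]
        simp

theorem polyLoopA_eq (l : List Char) :
    ∀ (ans : List Char) (count : Int),
      polyLoopA l ans count =
        if (((count + (segsR l).1) :: (segsR l).2).any
              (fun r => PySem.Int.mod r 2 != 0)) then "-1".toList
        else ans ++ PySem.Chars.join ['.'] (((count + (segsR l).1) :: (segsR l).2).map XtoAB) := by
  induction l with
  | nil =>
      intro ans count
      simp [polyLoopA, segsR, PySem.Chars.join_singleton, List.any_cons]
  | cons c rest ih =>
      intro ans count
      by_cases hc : c = 'X'
      · subst hc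
        rw [show polyLoopA ('X' :: rest) ans count = polyLoopA rest ans (count + 1) from by
              simp [polyLoopA],
            ih ans (count + 1), segsR_X]
        have h2 : count + 1 + (segsR rest).1 = count + ((segsR rest).1 + 1) := by ring
        rw [h2]
      · rw [show polyLoopA (c :: rest) ans count =
              (if (PySem.Int.mod count 2 != 0) then "-1".toList
               else polyLoopA rest (ans ++ XtoAB count ++ ['.']) 0) from by
              simp [polyLoopA, hc],
            segsR_sep c rest hc]
        cases hb : (PySem.Int.mod count 2 != 0) with
        | true =>
            simp only [List.any_cons, Int.add_zero, hb, Bool.true_or, if_true]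
        | false =>
            rw [if_neg (by simp), ih (ans ++ XtoAB count ++ ['.']) 0]
            have hb' : ¬ count % 2 = 1 := by simpa using hb
            simp [List.any_cons, PySem.Chars.join_cons_cons, List.append_assoc, hb']

theorem polyomino_eq_alt (s : String) : polyomino s = polyomino_alt s := by
  unfold polyomino polyomino_alt
  have h1 : s.toList.foldl runsStep [(0 : Int)] =
      (0 + (segsR s.toList).1) :: (segsR s.toList).2 := by
    have := foldl_runsStep_eq s.toList [] 0
    simpa using this
  rw [h1, polyLoopA_eq s.toList [] 0]
  cases hb : (((0 + (segsR s.toList).1) :: (segsR s.toList).2).any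
      (fun r => PySem.Int.mod r 2 != 0)) with
  | true =>
      simp only [hb, if_true]
      decide
  | false =>
      simp only [hb, Bool.false_eq_true, if_false, List.nil_append]

-- ===== VERDICT (by name: the statement is the Claim_ definition above) =====
theorem polyomino_spec : Claim_equal_polyomino := by
  intro s _
  unfold Spec_polyomino
  exact polyomino_eq_alt s
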